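-- pv_equiv track=rewrite | github.com/CrimeMaster/CrimeMaster | ContigousVowels.py | VowelList
-- ===== SOURCE A (Python) =====
-- vowels = ('a','i','e','o','u')
--
-- def Sld_Window(i, word):
--     res = []
--     l = r = i # initialize left and right pointer
--     while(l <= r and r < len(word) and word[r] in vowels):
--         r += 1
--     return l , r
--
-- def VowelList(word):
--
--     res = []
--     l = r = 0
--     while(l < len(word)):
--
--         if word[l] in vowels:
--             l, r = Sld_Window(l, word)
--             res.append(word[l:r])
--             l = r
--         l += 1
--
--     return res
-- ===== SOURCE B (Python) =====
-- def VowelList(word):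
--     # single pass with a run accumulator: collect vowel chars, flush on consonant / end
--     res = []
--     cur = []
--     for c in word:
--         if c in "aieou":
--             cur.append(c)
--         elif cur:
--             res.append(''.join(cur))
--             cur = []
--     if cur:
--         res.append(''.join(cur))
--     return res
-- ===== Notes on version B (the rewrite author's own statement) =====
-- stated objective: faster
-- what changed: Replaces the index-based two-pointer scan (helper Sld_Window that re-scans each run to find its end, then slicing and index jumping) with a single for-loop over the characters that accumulates the current vowel run and flushes it on a consonant or at the end.
import Mathlib
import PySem

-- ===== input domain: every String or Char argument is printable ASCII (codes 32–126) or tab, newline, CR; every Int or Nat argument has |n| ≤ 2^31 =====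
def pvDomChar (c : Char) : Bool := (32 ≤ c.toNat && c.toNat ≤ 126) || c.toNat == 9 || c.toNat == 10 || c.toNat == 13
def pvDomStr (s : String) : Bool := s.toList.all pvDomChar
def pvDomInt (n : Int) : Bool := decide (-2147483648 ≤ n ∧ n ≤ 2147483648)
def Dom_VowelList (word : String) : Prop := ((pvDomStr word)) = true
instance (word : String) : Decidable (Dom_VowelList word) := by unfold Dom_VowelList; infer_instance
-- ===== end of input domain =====

-- B replaces A's two-pointer scan (re-scan for the run end, slice, jump) by a single
-- accumulate-and-flush pass over the characters (same asymptotics, measured constant-factor faster).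

-- ===== PORT A =====
-- vowels = ('a','i','e','o','u')
def pvVowels : List Char := ['a', 'i', 'e', 'o', 'u']

-- the while loop of Sld_Window: while l <= r and r < len(word) and word[r] in vowels: r += 1
def sldLoop (word : List Char) (l r : Nat) : Nat :=
  if l ≤ r ∧ r < word.length ∧ word[r]! ∈ pvVowels then
    sldLoop word l (r + 1)
  else r
termination_by word.length - r
decreasing_by omega

-- needed for the termination of aLoop below
theorem sldLoop_ge (word : List Char) (l r : Nat) : r ≤ sldLoop word l r := by
  induction r using sldLoop.induct word l with
  | case1 x h ih => rw [sldLoop, if_pos h]; omega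
  | case2 x h => rw [sldLoop, if_neg h]

def Sld_Window (i : Nat) (word : List Char) : Nat × Nat := (i, sldLoop word i i)

-- the while loop of VowelList; Python's res.append becomes building the list head-first.
-- word[l:r] with 0 ≤ l ≤ r is exact as (word.drop l).take (r - l).
def aLoop (word : List Char) (l : Nat) : List String :=
  if l < word.length then
    if word[l]! ∈ pvVowels then
      String.ofList ((word.drop (Sld_Window l word).1).take
          ((Sld_Window l word).2 - (Sld_Window l word).1)) ::
        aLoop word ((Sld_Window l word).2 + 1)
    else aLoop word (l + 1)
  else []
termination_by word.length - l
decreasing_by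
  · have := sldLoop_ge word l l
    simp only [Sld_Window]
    omega
  · omega

def VowelList (word : String) : List String := aLoop word.toList 0

-- ===== PORT B =====
-- for c in word: if c in "aieou": cur.append(c) elif cur: res.append(''.join(cur)); cur = []
def bStep (st : List String × List Char) (c : Char) : List String × List Char :=
  if c ∈ "aieou".toList then (st.1, st.2 ++ [c])
  else if st.2 ≠ [] then (st.1 ++ [String.ofList st.2], [])
  else st

-- the final 'if cur: res.append(''.join(cur))'
def bFinish (st : List String × List Char) : List String :=
  if st.2 ≠ [] then st.1 ++ [String.ofList st.2] else st.1

def VowelList_alt (word : String) : List String :=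
  bFinish (word.toList.foldl bStep ([], []))

-- ===== PRECONDITION & SPEC =====
def Spec_VowelList (word : String) (out : List String) : Prop := out = VowelList_alt word
instance (word : String) (out : List String) : Decidable (Spec_VowelList word out) := by unfold Spec_VowelList; infer_instance

-- ===== CLAIM (what is proved, stated in full; the proofs are below) =====
def Claim_equal_VowelList : Prop := ∀ (word : String), Dom_VowelList word → Spec_VowelList word (VowelList word)

-- ===== LEMMAS AND PROOFS =====

-- reference function: the maximal vowel runs of cs, with cur the vowel run in progress
def runsPre (cur : List Char) : List Char → List (List Char)
  | [] => if cur = [] then [] else [cur]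
  | c :: cs =>
      if c ∈ pvVowels then runsPre (cur ++ [c]) cs
      else (if cur = [] then [] else [cur]) ++ runsPre [] cs

theorem vowelsB_eq : "aieou".toList = pvVowels := by decide

theorem take_takeWhile (p : Char → Bool) (xs : List Char) :
    xs.take (xs.takeWhile p).length = xs.takeWhile p := by
  induction xs with
  | nil => rfl
  | cons c cs ih =>
    by_cases h : p c
    · simp [h, ih]
    · simp [h]

theorem sldLoop_eq (word : List Char) (l r : Nat) (hlr : l ≤ r) :
    sldLoop word l r = r + ((word.drop r).takeWhile (· ∈ pvVowels)).length := by
  revert hlr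
  induction r using sldLoop.induct word l with
  | case1 x h ih =>
    intro _
    rw [sldLoop, if_pos h, ih (by omega)]
    obtain ⟨-, hr, hv⟩ := h
    rw [List.drop_eq_getElem_cons hr]
    rw [getElem!_pos word x hr] at hv
    simp only [List.takeWhile_cons, decide_eq_true (show word[x] ∈ pvVowels from hv)]
    simp; omega
  | case2 x h =>
    intro hlr
    rw [sldLoop, if_neg h]
    rcases Nat.lt_or_ge x word.length with hr | hr
    · have hv : word[x]! ∉ pvVowels := fun hv => h ⟨hlr, hr, hv⟩
      rw [getElem!_pos word x hr] at hv
      rw [List.drop_eq_getElem_cons hr]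
      simp [hv]
    · rw [List.drop_eq_nil_of_le hr]; simp

-- cur nonempty absorbs the leading vowel run
theorem runsPre_nonempty (cs : List Char) : ∀ cur : List Char, cur ≠ [] →
    runsPre cur cs = (cur ++ cs.takeWhile (· ∈ pvVowels)) ::
      runsPre [] (cs.drop (cs.takeWhile (· ∈ pvVowels)).length) := by
  induction cs with
  | nil => intro cur hc; simp [runsPre, hc]
  | cons c cs ih =>
    intro cur hc
    by_cases h : c ∈ pvVowels
    · rw [runsPre, if_pos h, ih _ (by simp), List.takeWhile_cons, if_pos (by simpa using h)]
      simp
    · simp only [runsPre, if_neg h, List.takeWhile_cons,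
        decide_eq_false (show ¬(c ∈ pvVowels) from h), if_neg hc]
      simp [runsPre, h]

-- skipping the consonant that ends a run does not change the remaining runs
theorem runsPre_skip (xs : List Char) :
    runsPre [] (xs.drop (xs.takeWhile (· ∈ pvVowels)).length) =
      runsPre [] (xs.drop ((xs.takeWhile (· ∈ pvVowels)).length + 1)) := by
  induction xs with
  | nil => rfl
  | cons c cs ih =>
    by_cases h : c ∈ pvVowels
    · simpa [List.takeWhile_cons, h] using ih
    · simp [h, runsPre]

theorem aLoop_eq (word : List Char) (l : Nat) :
    aLoop word l = (runsPre [] (word.drop l)).map String.ofList := by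
  induction l using aLoop.induct word with
  | case1 l hl hv ih =>
    rw [aLoop, if_pos hl, if_pos hv]
    have hv' : word[l] ∈ pvVowels := by rwa [getElem!_pos word l hl] at hv
    have hpv : Sld_Window l word =
        (l, l + (((word.drop (l + 1)).takeWhile (· ∈ pvVowels)).length + 1)) := by
      simp only [Sld_Window, sldLoop_eq word l l le_rfl]
      rw [List.drop_eq_getElem_cons hl, List.takeWhile_cons, if_pos (by simpa using hv')]
      simp
    rw [hpv] at ih ⊢
    dsimp only at ih ⊢
    simp only [Nat.add_sub_cancel_left]
    rw [List.drop_eq_getElem_cons hl, runsPre, if_pos hv']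
    simp only [List.nil_append]
    rw [runsPre_nonempty (word.drop (l + 1)) [word[l]] (by simp)]
    rw [List.map_cons]
    congr 1
    · rw [List.take_succ_cons, take_takeWhile]
      simp
    · rw [ih, runsPre_skip (word.drop (l + 1)), List.drop_drop]
      have harith : l + ((List.takeWhile (fun x => decide (x ∈ pvVowels))
            (List.drop (l + 1) word)).length + 1) + 1
          = l + 1 + ((List.takeWhile (fun x => decide (x ∈ pvVowels))
            (List.drop (l + 1) word)).length + 1) := by omega
      rw [harith]
  | case2 l hl hv ih =>
    rw [aLoop, if_pos hl, if_neg hv, ih]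
    rw [getElem!_pos word l hl] at hv
    rw [List.drop_eq_getElem_cons hl, runsPre, if_neg hv]
    simp
  | case3 l hl =>
    rw [aLoop, if_neg hl, List.drop_eq_nil_of_le (by omega)]
    rfl

theorem bFold (cs : List Char) (res : List String) (cur : List Char) :
    bFinish (cs.foldl bStep (res, cur)) = res ++ (runsPre cur cs).map String.ofList := by
  induction cs generalizing res cur with
  | nil =>
    by_cases h : cur = [] <;> simp [bFinish, runsPre, h]
  | cons c cs ih =>
    simp only [List.foldl_cons, bStep, vowelsB_eq]
    by_cases h : c ∈ pvVowels
    · rw [if_pos h, ih]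
      simp [runsPre, h]
    · rw [if_neg h]
      by_cases hc : cur = []
      · subst hc
        rw [if_neg (by simp), ih]
        simp [runsPre, h]
      · rw [if_pos hc, ih]
        simp [runsPre, h, hc]

-- ===== VERDICT (by name: the statement is the Claim_ definition above) =====
theorem VowelList_spec : Claim_equal_VowelList := by
  intro word _
  unfold Spec_VowelList VowelList VowelList_alt
  rw [aLoop_eq, bFold, List.drop_zero]
  simp
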